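-- pv_equiv track=rewrite | github.com/MrBrantCode/unitest_baseline | mut_generate/mist_train_cf/cf_96548/solution.py | get_string_length_and_frequency
-- ===== SOURCE A (Python) =====
-- def get_string_length_and_frequency(string):
--     length = 0
--     unique_chars = set()
--     frequency = {}
--
--     for char in string:
--         if char not in unique_chars:
--             unique_chars.add(char)
--             frequency[char] = 1
--         else:
--             frequency[char] += 1
--
--         length += 1
--
--     return length, len(unique_chars), frequency
-- ===== SOURCE B (Python) =====
-- def get_string_length_and_frequency(string):
--     # Distinct characters in first-occurrence order, then one counting scan per
--     # distinct character: no running frequency accumulator is maintained.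
--     order = list(dict.fromkeys(string))
--     frequency = {ch: string.count(ch) for ch in order}
--     return len(string), len(order), frequency
-- ===== Notes on version B (the rewrite author's own statement) =====
-- stated objective: alternative
-- what changed: Replaces A's single fused loop maintaining three accumulators (length, seen-set, running frequency dict with a membership branch) by a staged nested-scan algorithm: dedupe the string in first-occurrence order, then count each distinct character with its own separate str.count scan; no frequency state is carried through a loop, and the C-level scans replace the interpreted per-character loop.
import Mathlib
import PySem

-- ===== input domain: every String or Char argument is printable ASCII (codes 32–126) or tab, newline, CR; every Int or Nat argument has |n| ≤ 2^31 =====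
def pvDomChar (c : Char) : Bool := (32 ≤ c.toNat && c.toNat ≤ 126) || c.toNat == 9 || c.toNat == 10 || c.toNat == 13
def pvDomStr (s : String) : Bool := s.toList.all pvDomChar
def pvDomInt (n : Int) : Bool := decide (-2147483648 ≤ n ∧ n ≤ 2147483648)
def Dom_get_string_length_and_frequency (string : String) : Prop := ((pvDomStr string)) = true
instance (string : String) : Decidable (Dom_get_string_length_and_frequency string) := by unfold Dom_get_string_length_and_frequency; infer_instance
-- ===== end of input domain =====

-- B replaces A's single fused loop (length + seen-set + running frequency dict) by a staged
-- nested-scan algorithm: dedupe in first-occurrence order, then one counting scan per distinct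
-- character; same output, a genuinely different (O(k*n)) decomposition.

-- ===== PORT A =====
-- 'for char in string' yields the characters as 1-char strings, in order.
def get_string_length_and_frequency (string : String) : Int × Int × (List (String × Int)) :=
  let st := (string.toList.map (fun c => String.mk [c])).foldl
    (fun (st : Int × (PySem.Set String) × (PySem.Dict String Int)) ch =>
      if !(PySem.Set.contains st.2.1 ch) then
        (st.1 + 1, PySem.Set.add st.2.1 ch, st.2.2.insert ch 1)
      else
        (st.1 + 1, st.2.1, st.2.2.insert ch (st.2.2.getD ch 0 + 1)))
    (0, PySem.Set.empty, PySem.Dict.empty)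
  (st.1, (st.2.1.length : Int), st.2.2.items)

-- ===== PORT B =====
-- list(dict.fromkeys(string)) = PySem.List.dedup over the 1-char strings;
-- string.count(ch) for a 1-char ch is exactly the count of ch among the 1-char strings.
def get_string_length_and_frequency_alt (string : String) : Int × Int × (List (String × Int)) :=
  let chars := string.toList.map (fun c => String.mk [c])
  let order := PySem.List.dedup chars
  (PySem.Str.len string, (order.length : Int),
   order.map (fun ch => (ch, (chars.count ch : Int))))

-- ===== PRECONDITION & SPEC =====
def Spec_get_string_length_and_frequency (string : String) (out : Int × Int × (List (String × Int))) : Prop := out = get_string_length_and_frequency_alt string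
instance (string : String) (out : Int × Int × (List (String × Int))) : Decidable (Spec_get_string_length_and_frequency string out) := by unfold Spec_get_string_length_and_frequency; infer_instance

-- ===== CLAIM (what is proved, stated in full; the proofs are below) =====
def Claim_equal_get_string_length_and_frequency : Prop := ∀ (string : String), Dom_get_string_length_and_frequency string → Spec_get_string_length_and_frequency string (get_string_length_and_frequency string)

-- ===== LEMMAS AND PROOFS =====

-- A's fused loop, run from any state whose seen-set equals the dict's key list, is three
-- independent folds (length, set-build, counter-build).
theorem loopA_char (ks : List String) (n : Int) (s : PySem.Set String)
    (d : PySem.Dict String Int) (h : s = d.keys) :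
    ks.foldl
      (fun (st : Int × (PySem.Set String) × (PySem.Dict String Int)) ch =>
        if !(PySem.Set.contains st.2.1 ch) then
          (st.1 + 1, PySem.Set.add st.2.1 ch, st.2.2.insert ch 1)
        else
          (st.1 + 1, st.2.1, st.2.2.insert ch (st.2.2.getD ch 0 + 1)))
      (n, s, d)
    = (n + ks.length, ks.foldl PySem.Set.add s,
       ks.foldl (fun d x => d.insert x (d.getD x 0 + 1)) d) := by
  induction ks generalizing n s d with
  | nil => simp
  | cons x ks ih =>
    by_cases hc : PySem.Set.contains s x = true
    · have hd : d.contains x = true := by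
        rw [PySem.Dict.contains_iff_mem_keys, ← h]
        simpa [PySem.Set.contains] using hc
      have hadd : PySem.Set.add s x = s := by simp [PySem.Set.add, List.mem_of_elem_eq_true hc]
      simp only [List.foldl_cons, hc, Bool.not_true, Bool.false_eq_true, if_false, hadd]
      rw [ih (n + 1) s _ (by rw [h, PySem.Dict.keys_insert_of_contains d _ hd])]
      simp [add_comm, add_left_comm]
    · have hc' : PySem.Set.contains s x = false := by simpa using hc
      have hd : d.contains x = false := by
        by_contra hcon
        have : d.contains x = true := by simpa using hcon
        rw [PySem.Dict.contains_iff_mem_keys, ← h] at this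
        exact hc (by simpa [PySem.Set.contains] using this)
      have hone : d.insert x 1 = d.insert x (d.getD x 0 + 1) := by
        rw [PySem.Dict.getD_of_not_contains d 0 hd]; norm_num
      have hmem : x ∉ s := by
        intro hm
        have ht : PySem.Set.contains s x = true := List.elem_eq_true_of_mem hm
        rw [ht] at hc'; cases hc'
      simp only [List.foldl_cons, hc', Bool.not_false, if_true, hone]
      rw [ih (n + 1) _ _ (by
        rw [PySem.Dict.keys_insert_of_not_contains d _ hd, ← h]
        simp [PySem.Set.add, hmem])]
      simp [add_comm, add_left_comm]

-- ===== VERDICT (by name: the statement is the Claim_ definition above) =====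
theorem get_string_length_and_frequency_spec : Claim_equal_get_string_length_and_frequency := by
  intro s _
  unfold Spec_get_string_length_and_frequency
  unfold get_string_length_and_frequency get_string_length_and_frequency_alt
  rw [loopA_char _ _ _ _ (by simp [PySem.Set.empty, PySem.Dict.keys_empty])]
  simp [PySem.Set.empty, ← PySem.Set.ofList_eq_foldl,
    PySem.Dict.foldl_insert_getD_add_one_eq_counter, PySem.Dict.items_counter,
    PySem.Str.len]
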